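-- pv_equiv track=rewrite | github.com/Deepthi-Vemula/scaler-python | 7-strings/homework.py | changeChar
-- ===== SOURCE A (Python) =====
-- def changeChar(A, B):
--     alphabetCountMap = {}
--     for i in range(len(A)):
--         if A[i] in alphabetCountMap.keys():
--             alphabetCountMap[A[i]] += 1
--         else:
--             alphabetCountMap[A[i]] = 1
--     distCount = len(alphabetCountMap)
--     while B > 0 and len(alphabetCountMap) > 0:
--         minValKey = min(alphabetCountMap, key=lambda k: alphabetCountMap[k])
--         minVal = alphabetCountMap[minValKey]
--         if minVal > B:
--             break
--         alphabetCountMap.pop(minValKey)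
--         distCount -= 1
--         B -= minVal
--     return distCount
-- ===== SOURCE B (Python) =====
-- def changeChar(A, B):
--     counts = {}
--     for c in A:
--         counts[c] = counts.get(c, 0) + 1
--     distinct = len(counts)
--     for f in sorted(counts.values()):
--         if f > B:
--             break
--         B -= f
--         distinct -= 1
--     return distinct
-- ===== Notes on version B (the rewrite author's own statement) =====
-- stated objective: faster
-- what changed: Replace the quadratic repeated min-scan-and-pop loop over the count dict with one ascending sort of the frequency values followed by a single greedy subtraction pass.
import Mathlib
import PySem

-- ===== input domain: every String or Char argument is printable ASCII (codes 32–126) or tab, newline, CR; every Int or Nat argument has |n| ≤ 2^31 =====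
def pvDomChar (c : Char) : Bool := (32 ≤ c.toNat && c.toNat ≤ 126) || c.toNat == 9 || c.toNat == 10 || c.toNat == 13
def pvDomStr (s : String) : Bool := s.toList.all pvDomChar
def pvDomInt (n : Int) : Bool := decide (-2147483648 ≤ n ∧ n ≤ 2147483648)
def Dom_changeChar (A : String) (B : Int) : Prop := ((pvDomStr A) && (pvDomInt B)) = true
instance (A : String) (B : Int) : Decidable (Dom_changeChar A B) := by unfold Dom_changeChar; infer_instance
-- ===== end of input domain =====

-- B replaces A's repeated min-scan-and-pop over the count dict by one ascending sort of the
-- frequency values followed by a single greedy subtraction pass (objective: faster).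


-- ===== PORT A =====
-- the counting loop: A[i] in keys → map[A[i]] += 1, else map[A[i]] = 1
def aCount (l : List Char) : PySem.Dict Char Int :=
  l.foldl (fun d c =>
    match d.get? c with
    | some v => d.insert c (v + 1)
    | none => d.insert c 1) PySem.Dict.empty

-- erase termination helper (the erased key is in the dict)
theorem aErase_lt (d : PySem.Dict Char Int) (mk : Char)
    (hm : PySem.List.min? d.keys (fun k => d.getD k 0) = some mk) :
    (d.erase mk).items.length < d.items.length := by
  have hk : mk ∈ d.keys := PySem.List.min?_mem hm
  simp only [PySem.Dict.keys, List.mem_map] at hk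
  obtain ⟨p, hp, hpk⟩ := hk
  simp only [PySem.Dict.erase]
  refine List.length_filter_lt_length_iff_exists.mpr ⟨p, hp, ?_⟩
  simp [hpk]

-- the while loop: B > 0 and dict nonempty → pop the first min-valued key
def aLoop (d : PySem.Dict Char Int) (B dist : Int) : Int :=
  if B > 0 ∧ d.size > 0 then
    match hm : PySem.List.min? d.keys (fun k => d.getD k 0) with
    | none => dist
    | some mk =>
      let mv := d.getD mk 0
      if mv > B then dist
      else aLoop (d.erase mk) (B - mv) (dist - 1)
  else dist
termination_by d.items.length
decreasing_by exact aErase_lt d mk hm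

def changeChar (A : String) (B : Int) : Int :=
  let alphabetCountMap := aCount A.toList
  aLoop alphabetCountMap B (alphabetCountMap.size : Int)

-- ===== PORT B =====
-- the single greedy pass of Source B over the sorted frequency list
def bLoop : List Int → Int → Int → Int
  | [], _, dist => dist
  | f :: rest, b, dist => if f > b then dist else bLoop rest (b - f) (dist - 1)

def changeChar_alt (A : String) (B : Int) : Int :=
  let counts := A.toList.foldl (fun d c => d.insert c (d.getD c 0 + 1)) PySem.Dict.empty
  bLoop (PySem.List.sorted counts.values (fun x => x) false) B (counts.size : Int)

-- ===== PRECONDITION & SPEC =====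
def Spec_changeChar (A : String) (B : Int) (out : Int) : Prop := out = changeChar_alt A B
instance (A : String) (B : Int) (out : Int) : Decidable (Spec_changeChar A B out) := by unfold Spec_changeChar; infer_instance

-- ===== CLAIM (what is proved, stated in full; the proofs are below) =====
def Claim_equal_changeChar : Prop := ∀ (A : String) (B : Int), Dom_changeChar A B → Spec_changeChar A B (changeChar A B)

-- ===== LEMMAS AND PROOFS =====

-- A's counting loop builds the same dict as B's (the branch on membership is insert c (getD c 0 + 1))
theorem aCount_eq (l : List Char) :
    aCount l = l.foldl (fun d c => d.insert c (d.getD c 0 + 1)) PySem.Dict.empty := by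
  unfold aCount
  suffices h : ∀ (d : PySem.Dict Char Int),
      l.foldl (fun d c =>
        match d.get? c with
        | some v => d.insert c (v + 1)
        | none => d.insert c 1) d
      = l.foldl (fun d c => d.insert c (d.getD c 0 + 1)) d from h _
  induction l with
  | nil => intro d; rfl
  | cons c t ih =>
    intro d
    simp only [List.foldl_cons]
    have hstep : (match d.get? c with
        | some v => d.insert c (v + 1)
        | none => d.insert c 1) = d.insert c (d.getD c 0 + 1) := by
      cases hg : d.get? c with
      | some v => simp [PySem.Dict.getD_of_get?_eq_some d 0 hg]
      | none => simp [PySem.Dict.getD_of_get?_eq_none d 0 hg]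
    rw [hstep, ih]

-- one min-keyed item pulled out of a nodup-keyed items list, as a permutation
theorem filter_cons_perm (l : List (Char × Int)) (mk : Char) (mv : Int)
    (hnd : (l.map Prod.fst).Nodup) (hmem : (mk, mv) ∈ l) :
    ((mk, mv) :: l.filter (fun p => !(p.1 == mk))).Perm l := by
  induction l with
  | nil => cases hmem
  | cons p t ih =>
    simp only [List.map_cons, List.nodup_cons] at hnd
    by_cases hp : p.1 = mk
    · have hpt : (mk, mv) ∉ t := by
        intro h
        exact hnd.1 (hp ▸ (List.mem_map.mpr ⟨(mk, mv), h, rfl⟩))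
      have hpe : p = (mk, mv) := by
        rcases List.mem_cons.mp hmem with h | h
        · exact h.symm
        · exact absurd h hpt
      subst hpe
      have hft : t.filter (fun q => !(q.1 == mk)) = t := by
        apply List.filter_eq_self.mpr
        intro q hq
        simp only [Bool.not_eq_eq_eq_not, Bool.not_true, beq_eq_false_iff_ne, ne_eq]
        intro hq1
        exact hnd.1 (List.mem_map.mpr ⟨q, hq, by simpa using hq1⟩)
      simp [hft]
    · have hmt : (mk, mv) ∈ t := by
        rcases List.mem_cons.mp hmem with h | h
        · exact absurd (by rw [← h]) hp
        · exact h
      have := ih hnd.2 hmt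
      simp only [List.filter_cons]
      have hpk : (!(p.1 == mk)) = true := by simp [hp]
      rw [hpk]
      exact (List.Perm.swap p (mk, mv) _).trans (List.Perm.cons p this)

-- main loop equivalence: A's pop-the-min loop equals B's pass over the sorted values
-- membership of the erased dict's values in the original's
theorem mem_values_erase (d : PySem.Dict Char Int) (mk : Char) (v : Int)
    (h : v ∈ (d.erase mk).values) : v ∈ d.values := by
  simp only [PySem.Dict.values, PySem.Dict.erase, List.mem_map] at h ⊢
  obtain ⟨p, hp, hpv⟩ := h
  exact ⟨p, List.Sublist.mem hp List.filter_sublist, hpv⟩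

-- keys of the erased dict stay Nodup
theorem nodup_keys_erase (d : PySem.Dict Char Int) (mk : Char)
    (hnd : d.keys.Nodup) : (d.erase mk).keys.Nodup := by
  simp only [PySem.Dict.keys, PySem.Dict.erase] at *
  exact hnd.sublist (List.Sublist.map _ List.filter_sublist)

-- pulling the first min-valued key off the dict pulls the head off the sorted value list
theorem sorted_step (d : PySem.Dict Char Int) (hnd : d.keys.Nodup) (mk : Char)
    (hm : PySem.List.min? d.keys (fun k => d.getD k 0) = some mk) :
    PySem.List.sorted d.values (fun x => x) false
      = d.getD mk 0 :: PySem.List.sorted (d.erase mk).values (fun x => x) false := by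
  have hk : mk ∈ d.keys := PySem.List.min?_mem hm
  simp only [PySem.Dict.keys, List.mem_map] at hk
  obtain ⟨p, hp', hpk⟩ := hk
  obtain ⟨mk', mv⟩ := p
  have hp : (mk, mv) ∈ d.items := by cases hpk; exact hp'
  have hgd : d.getD mk 0 = mv := PySem.Dict.getD_of_mem_items d hp hnd 0
  have hmin : ∀ v ∈ d.values, mv ≤ v := by
    intro v hv
    rw [PySem.Dict.values_eq_map_keys d hnd 0] at hv
    obtain ⟨k, hk', hkv⟩ := List.mem_map.mp hv
    have := PySem.List.min?_isMin hm k hk'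
    rw [hgd] at this
    exact hkv ▸ this
  rw [hgd]
  apply (PySem.List.sorted_id_eq_of_perm_of_pairwise _ _ ?_ ?_)
  · -- permutation
    have h1 : ((mk, mv) :: (d.items).filter (fun q => !(q.1 == mk))).Perm d.items :=
      filter_cons_perm d.items mk mv hnd hp
    have h2 := h1.map Prod.snd
    simp only [List.map_cons] at h2
    refine List.Perm.trans (List.Perm.cons mv (PySem.List.sorted_perm _ _ _)) ?_
    simpa [PySem.Dict.values, PySem.Dict.erase] using h2
  · -- pairwise ≤
    refine List.pairwise_cons.mpr ⟨?_, ?_⟩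
    · intro y hy
      rw [PySem.List.mem_sorted] at hy
      exact hmin y (mem_values_erase d mk y hy)
    · exact PySem.List.sorted_pairwise _ _

-- main loop equivalence: A's pop-the-min loop equals B's pass over the sorted values
theorem loop_eq (n : Nat) : ∀ (d : PySem.Dict Char Int), d.items.length ≤ n →
    d.keys.Nodup → (∀ v ∈ d.values, 1 ≤ v) → ∀ (B dist : Int),
    aLoop d B dist = bLoop (PySem.List.sorted d.values (fun x => x) false) B dist := by
  induction n with
  | zero =>
    intro d hlen _ _ B dist
    have hit : d.items = [] := List.eq_nil_of_length_eq_zero (Nat.le_zero.mp hlen)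
    have hv : d.values = [] := by simp [PySem.Dict.values, hit]
    rw [aLoop]
    have : ¬ (B > 0 ∧ d.size > 0) := by
      simp [PySem.Dict.size, hit]
    rw [if_neg this, hv]
    rfl
  | succ n ih =>
    intro d hlen hnd hpos B dist
    by_cases hc : B > 0 ∧ d.size > 0
    · have hkne : d.keys ≠ [] := by
        intro h
        have : d.items = [] := by
          simpa [PySem.Dict.keys] using congrArg List.length h
        simp [PySem.Dict.size, this] at hc
      rw [aLoop, if_pos hc]
      split
      · next hm => exact absurd ((PySem.List.min?_eq_none_iff _ _).mp hm) hkne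
      · next mk hm =>
        rw [sorted_step d hnd mk hm]
        simp only [bLoop]
        by_cases hgt : d.getD mk 0 > B
        · rw [if_pos hgt, if_pos hgt]
        · rw [if_neg hgt, if_neg hgt]
          have hlt := aErase_lt d mk hm
          exact ih (d.erase mk) (by omega) (nodup_keys_erase d mk hnd)
            (fun v hv => hpos v (mem_values_erase d mk v hv)) _ _
    · rw [aLoop, if_neg hc]
      cases hs : PySem.List.sorted d.values (fun x => x) false with
      | nil => rfl
      | cons f rest =>
        have hf : f ∈ d.values := by
          rw [← PySem.List.mem_sorted d.values (fun x => x) false, hs]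
          exact List.mem_cons_self
        have hf1 : 1 ≤ f := hpos f hf
        have hine : d.items ≠ [] := by
          intro h
          simp [PySem.Dict.values, h] at hf
        have hB : ¬ B > 0 := by
          intro hB
          exact hc ⟨hB, by simpa [PySem.Dict.size, List.length_pos_iff] using hine⟩
        simp only [bLoop]
        rw [if_pos (by omega)]

-- counting invariants through the counter form
theorem counter_nodup (l : List Char) :
    (PySem.Dict.counter l (κ := Char)).keys.Nodup := PySem.Dict.nodup_keys_counter l

theorem counter_values_pos (l : List Char) :
    ∀ v ∈ (PySem.Dict.counter l (κ := Char)).values, (1 : Int) ≤ v := by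
  intro v hv
  simp only [PySem.Dict.values, PySem.Dict.items_counter, List.map_map, List.mem_map] at hv
  obtain ⟨k, hk, hkv⟩ := hv
  have hkmem : k ∈ l := (PySem.Set.mem_ofList l k).mp hk
  have : 1 ≤ l.count k := List.count_pos_iff.mpr hkmem
  simp only [Function.comp_apply] at hkv
  rw [← hkv]
  exact_mod_cast this

-- ===== VERDICT (by name: the statement is the Claim_ definition above) =====
theorem changeChar_spec : Claim_equal_changeChar := by
  unfold Claim_equal_changeChar
  intro A B _
  unfold Spec_changeChar changeChar changeChar_alt
  rw [aCount_eq, PySem.Dict.foldl_insert_getD_add_one_eq_counter]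
  exact loop_eq (PySem.Dict.counter A.toList).items.length _ le_rfl
    (counter_nodup A.toList) (counter_values_pos A.toList) B _
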